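-- pv_equiv track=rewrite | github.com/yangj1211/mo-doc | scripts/migrate_ia_intelligence.py | remap_path
-- ===== SOURCE A (Python) =====
-- DIR_MOVES = [
--     ("Workspace-Mgmt",   "workspace/management"),
--     ("Instance-Mgmt",    "workspace/instance"),
--     ("Backup-Restore",   "operate/backup-restore"),
--     ("Migrate-Data",     "data/migrate"),
--     ("Data-Connect",     "data/connect"),
--     ("Data-Explore",     "data/explore"),
--     ("Data-Processing",  "data/processing"),
--     ("Data-Sharing",     "data/sharing"),
--     ("Get-Started",      "get-started"),
--     ("Release-Notes",    "release-notes"),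
--     ("App-Develop",      "develop/app-develop"),
--     ("Reference",        "reference"),
--     ("Overview",         "overview"),
--     ("Charging",         "overview/charging"),
--     ("Protocol",         "overview/protocol"),
--     ("Security",         "operate/security"),
--     ("Monitor",          "operate/monitor"),
--     ("Events",           "operate/events"),
--     ("Alarm",            "operate/alarm"),
--     ("FAQs",             "help/faqs"),
--     ("workflow-api",     "develop/workflow-api"),
--     ("mcp",              "develop/mcp"),
--     # develop/ 已存在,deerflow.md 在里面,不需要 mv 顶级 develop 目录本身
--     # 但 develop/deerflow.md 这种文件需要保持原位 → 在 FILE_MOVES 里不列即可。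
-- ]
--
-- FILE_MOVES = [
--     ("intro.md",            "overview/intro.md"),
--     ("start.md",            "get-started/start.md"),
--     ("billing.md",          "overview/billing.md"),
--     ("protocols.md",        "overview/protocols.md"),
--     ("genai-workspace.md",  "workspace/genai-workspace.md"),
--     ("db-instance.md",      "workspace/db-instance.md"),
--     ("monitoring.md",       "operate/monitoring.md"),
--     ("releases.md",         "release-notes/releases.md"),
--     ("tech-support.md",     "help/tech-support.md"),
--     ("glossary.md",         "help/glossary.md"),
-- ]
--
-- def remap_path(rel: str) -> str:
--     rel = rel.replace("\\", "/")
--     if not rel: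
--         return rel
--     for old, new in FILE_MOVES:
--         if rel == old:
--             return new
--     for old, new in DIR_MOVES:
--         if rel == old:
--             return new
--         if rel.startswith(old + "/"):
--             return new + rel[len(old):]
--     return rel
-- ===== SOURCE B (Python) =====
-- # B: table-driven — a declarative spec table (list of lines) parsed once at import into an exact-path
-- # dict and a first-segment prefix dict; remap_path is then two keyed lookups, no scans.
-- _SPEC = [
--     "f intro.md overview/intro.md",
--     "f start.md get-started/start.md",
--     "f billing.md overview/billing.md",
--     "f protocols.md overview/protocols.md",
--     "f genai-workspace.md workspace/genai-workspace.md",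
--     "f db-instance.md workspace/db-instance.md",
--     "f monitoring.md operate/monitoring.md",
--     "f releases.md release-notes/releases.md",
--     "f tech-support.md help/tech-support.md",
--     "f glossary.md help/glossary.md",
--     "d Workspace-Mgmt workspace/management",
--     "d Instance-Mgmt workspace/instance",
--     "d Backup-Restore operate/backup-restore",
--     "d Migrate-Data data/migrate",
--     "d Data-Connect data/connect",
--     "d Data-Explore data/explore",
--     "d Data-Processing data/processing",
--     "d Data-Sharing data/sharing",
--     "d Get-Started get-started",
--     "d Release-Notes release-notes",
--     "d App-Develop develop/app-develop",
--     "d Reference reference",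
--     "d Overview overview",
--     "d Charging overview/charging",
--     "d Protocol overview/protocol",
--     "d Security operate/security",
--     "d Monitor operate/monitor",
--     "d Events operate/events",
--     "d Alarm operate/alarm",
--     "d FAQs help/faqs",
--     "d workflow-api develop/workflow-api",
--     "d mcp develop/mcp",
-- ]
--
-- EXACT = {}
-- PREFIX = {}
-- for _line in _SPEC:
--     _kind, _old, _new = _line.split(" ")
--     EXACT[_old] = _new
--     if _kind == "d":
--         PREFIX[_old] = _new
--
-- def remap_path(rel: str) -> str:
--     rel = rel.replace("\\", "/")
--     if not rel:
--         return rel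
--     hit = EXACT.get(rel)
--     if hit is not None:
--         return hit
--     i = rel.find("/")
--     if i != -1:
--         tgt = PREFIX.get(rel[:i])
--         if tgt is not None:
--             return tgt + rel[i:]
--     return rel
-- ===== Notes on version B (the rewrite author's own statement) =====
-- stated objective: alternative
-- what changed: Replaced A's two in-order scan loops (exact file scan, then exact/startswith dir scan) by a declarative spec table parsed once at import into two dicts (an exact-path map and a first-segment prefix map); remap_path is then a direct exact lookup and, failing that, one find('/')-split plus a prefix-dict lookup.
import Mathlib
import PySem

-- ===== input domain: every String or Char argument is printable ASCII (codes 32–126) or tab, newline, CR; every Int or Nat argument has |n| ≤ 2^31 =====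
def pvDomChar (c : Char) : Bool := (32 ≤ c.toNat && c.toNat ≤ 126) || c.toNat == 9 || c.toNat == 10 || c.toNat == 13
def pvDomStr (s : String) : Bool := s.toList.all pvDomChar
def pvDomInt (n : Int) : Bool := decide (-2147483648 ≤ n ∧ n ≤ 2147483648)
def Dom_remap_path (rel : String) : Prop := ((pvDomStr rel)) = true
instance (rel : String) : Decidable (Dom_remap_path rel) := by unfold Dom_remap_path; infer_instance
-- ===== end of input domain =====

set_option maxRecDepth 8192
set_option maxHeartbeats 2000000


-- B is table-driven: a declarative spec table is parsed once at module load into an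
-- exact-path dict and a first-segment prefix dict; remap_path is then two keyed lookups
-- instead of A's two in-order scan loops (objective: alternative).

-- ===== PORT A =====
-- A's module-level tables DIR_MOVES / FILE_MOVES
def dirMoves : List (List Char × List Char) :=
  [("Workspace-Mgmt".toList,   "workspace/management".toList),
   ("Instance-Mgmt".toList,    "workspace/instance".toList),
   ("Backup-Restore".toList,   "operate/backup-restore".toList),
   ("Migrate-Data".toList,     "data/migrate".toList),
   ("Data-Connect".toList,     "data/connect".toList),
   ("Data-Explore".toList,     "data/explore".toList),
   ("Data-Processing".toList,  "data/processing".toList),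
   ("Data-Sharing".toList,     "data/sharing".toList),
   ("Get-Started".toList,      "get-started".toList),
   ("Release-Notes".toList,    "release-notes".toList),
   ("App-Develop".toList,      "develop/app-develop".toList),
   ("Reference".toList,        "reference".toList),
   ("Overview".toList,         "overview".toList),
   ("Charging".toList,         "overview/charging".toList),
   ("Protocol".toList,         "overview/protocol".toList),
   ("Security".toList,         "operate/security".toList),
   ("Monitor".toList,          "operate/monitor".toList),
   ("Events".toList,           "operate/events".toList),
   ("Alarm".toList,            "operate/alarm".toList),
   ("FAQs".toList,             "help/faqs".toList),
   ("workflow-api".toList,     "develop/workflow-api".toList),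
   ("mcp".toList,              "develop/mcp".toList)]

def fileMoves : List (List Char × List Char) :=
  [("intro.md".toList,            "overview/intro.md".toList),
   ("start.md".toList,            "get-started/start.md".toList),
   ("billing.md".toList,          "overview/billing.md".toList),
   ("protocols.md".toList,        "overview/protocols.md".toList),
   ("genai-workspace.md".toList,  "workspace/genai-workspace.md".toList),
   ("db-instance.md".toList,      "workspace/db-instance.md".toList),
   ("monitoring.md".toList,       "operate/monitoring.md".toList),
   ("releases.md".toList,         "release-notes/releases.md".toList),
   ("tech-support.md".toList,     "help/tech-support.md".toList),
   ("glossary.md".toList,         "help/glossary.md".toList)]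

-- A's first loop: 'for old, new in FILE_MOVES: if rel == old: return new'
def scanFileA : List (List Char × List Char) → List Char → Option (List Char)
  | [], _ => none
  | (old, new) :: rest, cs => if cs = old then some new else scanFileA rest cs

-- A's second loop: exact match or directory-prefix match ('rel.startswith(old + "/")')
def scanDirA : List (List Char × List Char) → List Char → Option (List Char)
  | [], _ => none
  | (old, new) :: rest, cs =>
    if cs = old then some new
    else if PySem.Chars.startswith cs (old ++ ['/']) then
      some (new ++ PySem.List.slice cs (some (old.length : Int)) none)   -- new + rel[len(old):]
    else scanDirA rest cs

def remap_path (rel : String) : String :=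
  let cs := PySem.Chars.replace rel.toList "\\".toList "/".toList
  if cs = [] then String.ofList cs
  else match scanFileA fileMoves cs with
  | some new => String.ofList new
  | none =>
    match scanDirA dirMoves cs with
    | some r => String.ofList r
    | none => String.ofList cs

-- ===== PORT B =====
-- B's declarative spec _SPEC: a list of lines ("f"/"d" kind, old path, new path)
def specB : List (List Char) :=
  ["f intro.md overview/intro.md".toList,
   "f start.md get-started/start.md".toList,
   "f billing.md overview/billing.md".toList,
   "f protocols.md overview/protocols.md".toList,
   "f genai-workspace.md workspace/genai-workspace.md".toList,
   "f db-instance.md workspace/db-instance.md".toList,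
   "f monitoring.md operate/monitoring.md".toList,
   "f releases.md release-notes/releases.md".toList,
   "f tech-support.md help/tech-support.md".toList,
   "f glossary.md help/glossary.md".toList,
   "d Workspace-Mgmt workspace/management".toList,
   "d Instance-Mgmt workspace/instance".toList,
   "d Backup-Restore operate/backup-restore".toList,
   "d Migrate-Data data/migrate".toList,
   "d Data-Connect data/connect".toList,
   "d Data-Explore data/explore".toList,
   "d Data-Processing data/processing".toList,
   "d Data-Sharing data/sharing".toList,
   "d Get-Started get-started".toList,
   "d Release-Notes release-notes".toList,
   "d App-Develop develop/app-develop".toList,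
   "d Reference reference".toList,
   "d Overview overview".toList,
   "d Charging overview/charging".toList,
   "d Protocol overview/protocol".toList,
   "d Security operate/security".toList,
   "d Monitor operate/monitor".toList,
   "d Events operate/events".toList,
   "d Alarm operate/alarm".toList,
   "d FAQs help/faqs".toList,
   "d workflow-api develop/workflow-api".toList,
   "d mcp develop/mcp".toList]

-- the module-load loop: '_kind, _old, _new = _line.split(" "); EXACT[_old] = _new; if _kind == "d": PREFIX[_old] = _new'
def addLineB (acc : PySem.Dict (List Char) (List Char) × PySem.Dict (List Char) (List Char))
    (line : List Char) :
    PySem.Dict (List Char) (List Char) × PySem.Dict (List Char) (List Char) :=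
  match PySem.Chars.splitOn line " ".toList with
  | [kind, old, new] =>
      (acc.1.insert old new, if kind = "d".toList then acc.2.insert old new else acc.2)
  | _ => acc   -- Python raises on a malformed line; the fixed spec has none

def tablesB : PySem.Dict (List Char) (List Char) × PySem.Dict (List Char) (List Char) :=
  specB.foldl addLineB (PySem.Dict.mk [], PySem.Dict.mk [])

def exactB : PySem.Dict (List Char) (List Char) := tablesB.1
def prefixB : PySem.Dict (List Char) (List Char) := tablesB.2

def remap_path_alt (rel : String) : String :=
  let cs := PySem.Chars.replace rel.toList "\\".toList "/".toList
  if cs = [] then String.ofList cs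
  else match exactB.get? cs with
  | some hit => String.ofList hit
  | none =>
    let i := PySem.Chars.find cs "/".toList          -- i = rel.find("/")
    if i ≠ -1 then
      match prefixB.get? (PySem.List.slice cs none (some i)) with   -- PREFIX.get(rel[:i])
      | some tgt => String.ofList (tgt ++ PySem.List.slice cs (some i) none)  -- tgt + rel[i:]
      | none => String.ofList cs
    else String.ofList cs

-- ===== PRECONDITION & SPEC =====
def Spec_remap_path (rel : String) (out : String) : Prop := out = remap_path_alt rel
instance (rel : String) (out : String) : Decidable (Spec_remap_path rel out) := by unfold Spec_remap_path; infer_instance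

-- ===== CLAIM =====
def Claim_equal_remap_path : Prop := ∀ (rel : String), Dom_remap_path rel → Spec_remap_path rel (remap_path rel)

-- ===== LEMMAS AND PROOFS =====

-- no table key contains '/'
lemma keys_no_slash : ∀ p ∈ fileMoves ++ dirMoves, '/' ∉ p.1 := by decide

-- parsing the spec yields exactly the dicts over A's tables, files first
lemma exactB_eq : exactB = PySem.Dict.mk (fileMoves ++ dirMoves) := by decide

lemma prefixB_eq : prefixB = PySem.Dict.mk dirMoves := by decide

-- Dict.get? on a duplicate-free literal dict is the exact-scan loop
lemma get?_mk_eq_scan (ms : List (List Char × List Char)) (cs : List Char) :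
    (PySem.Dict.mk ms).get? cs = scanFileA ms cs := by
  induction ms with
  | nil => rfl
  | cons p rest ih =>
    obtain ⟨old, new⟩ := p
    rw [PySem.Dict.get?_mk_cons]
    simp only [scanFileA]
    by_cases h : cs = old
    · simp [h]
    · simp [h, Ne.symm h, ih]

lemma scanFileA_append (xs ys : List (List Char × List Char)) (cs : List Char) :
    scanFileA (xs ++ ys) cs =
      (match scanFileA xs cs with | some v => some v | none => scanFileA ys cs) := by
  induction xs with
  | nil => rfl
  | cons p rest ih =>
    obtain ⟨old, new⟩ := p
    simp only [List.cons_append, scanFileA]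
    by_cases h : cs = old <;> simp [h, ih]

-- no slash in cs: the dir loop's prefix branches never fire
lemma scanDirA_no_slash (ms : List (List Char × List Char)) (cs : List Char)
    (hcs : '/' ∉ cs) : scanDirA ms cs = scanFileA ms cs := by
  induction ms with
  | nil => rfl
  | cons p rest ih =>
    obtain ⟨old, new⟩ := p
    simp only [scanDirA, scanFileA]
    by_cases h : cs = old
    · simp [h]
    · have hpre : ¬ PySem.Chars.startswith cs (old ++ ['/']) = true := by
        rw [PySem.Chars.startswith_iff]
        intro hp
        exact hcs (hp.mem (by simp))
      simp [h, hpre, ih]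

-- slash in cs: an exact-scan over slash-free keys misses
lemma scanFileA_none_of_slash (ms : List (List Char × List Char)) (cs : List Char)
    (hk : ∀ p ∈ ms, '/' ∉ p.1) (hcs : '/' ∈ cs) : scanFileA ms cs = none := by
  induction ms with
  | nil => rfl
  | cons p rest ih =>
    obtain ⟨old, new⟩ := p
    simp only [scanFileA]
    have h : cs ≠ old := by
      intro h; exact hk ⟨old, new⟩ (by simp) (h ▸ hcs)
    simp [h]
    exact ih (fun q hq => hk q (by simp [hq]))

-- a slash-free key followed by '/' is a prefix of head ++ '/' :: tail iff key = head
lemma prefix_slash (old head : List Char) (tail : List Char)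
    (ho : '/' ∉ old) (hh : '/' ∉ head) :
    ((old ++ ['/']) <+: (head ++ '/' :: tail)) ↔ old = head := by
  constructor
  · intro hp
    induction old generalizing head with
    | nil =>
      cases head with
      | nil => rfl
      | cons c hd =>
        exfalso
        simp only [List.nil_append, List.cons_append, List.cons_prefix_cons] at hp
        exact hh (List.mem_cons.mpr (Or.inl hp.1))
    | cons c old' ih =>
      cases head with
      | nil =>
        exfalso
        simp only [List.cons_append, List.nil_append, List.cons_prefix_cons] at hp
        exact ho (List.mem_cons.mpr (Or.inl hp.1.symm))
      | cons d hd =>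
        simp only [List.cons_append, List.cons_prefix_cons] at hp
        obtain ⟨hcd, hp'⟩ := hp
        have ho' : '/' ∉ old' := fun h => ho (List.mem_cons_of_mem _ h)
        have hh' : '/' ∉ hd := fun h => hh (List.mem_cons_of_mem _ h)
        simp [hcd, ih hd ho' hh' hp']
  · rintro rfl
    exact ⟨tail, by simp⟩

-- the dir loop on head ++ '/' :: tail is an exact-scan on head, appending '/' :: tail
lemma scanDirA_split (ms : List (List Char × List Char)) (head tail : List Char)
    (hk : ∀ p ∈ ms, '/' ∉ p.1) (hh : '/' ∉ head) :
    scanDirA ms (head ++ '/' :: tail) =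
      (match scanFileA ms head with
       | some new => some (new ++ '/' :: tail)
       | none => none) := by
  induction ms with
  | nil => rfl
  | cons p rest ih =>
    obtain ⟨old, new⟩ := p
    have hold : '/' ∉ old := hk ⟨old, new⟩ (by simp)
    simp only [scanDirA, scanFileA]
    have hne : head ++ '/' :: tail ≠ old := by
      intro h; exact hold (h ▸ (by simp : '/' ∈ head ++ '/' :: tail))
    by_cases h : head = old
    · subst h
      have hpre : PySem.Chars.startswith (head ++ '/' :: tail) (head ++ ['/']) = true := by
        rw [PySem.Chars.startswith_iff]
        exact ⟨tail, by simp⟩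
      rw [PySem.List.slice_from_natCast]
      simp [hne, hpre]
    · have hpre : ¬ PySem.Chars.startswith (head ++ '/' :: tail) (old ++ ['/']) = true := by
        rw [PySem.Chars.startswith_iff, prefix_slash old head tail hold hh]
        exact fun he => h he.symm
      simp [hne, hpre, Ne.symm, h]
      exact ih (fun q hq => hk q (by simp [hq]))

-- ===== VERDICT =====
theorem remap_path_spec : Claim_equal_remap_path := by
  intro rel _
  unfold Spec_remap_path remap_path remap_path_alt
  set cs := PySem.Chars.replace rel.toList "\\".toList "/".toList with hcs
  by_cases hemp : cs = []
  · rw [if_pos hemp, if_pos hemp]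
  · simp only [hemp, if_false]
    by_cases hsl : '/' ∈ cs
    · -- slash present: exact scans miss, the dir loop is a prefix scan on the first segment
      obtain ⟨H, T, hHT⟩ := List.append_of_mem hsl
      have hfind0 : 0 ≤ PySem.Chars.find cs "/".toList := by
        rw [PySem.Chars.find_nonneg_iff]
        exact ⟨H, T, by simp [hHT]⟩
      obtain ⟨hpref, hmin⟩ := PySem.Chars.find_spec hfind0
      set n := (PySem.Chars.find cs "/".toList).toNat with hn
      have hdropn : cs.drop n = '/' :: cs.drop (n + 1) := by
        obtain ⟨t, ht⟩ := hpref
        rw [show ("/".toList : List Char) = ['/'] from rfl, List.singleton_append] at ht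
        rw [← ht, ← List.tail_drop, ← ht]
        rfl
      have hdecomp : cs = cs.take n ++ '/' :: cs.drop (n + 1) := by
        conv_lhs => rw [← List.take_append_drop n cs]
        rw [hdropn]
      have hnos : '/' ∉ cs.take n := by
        intro hmem
        obtain ⟨j, hj, hget⟩ := List.getElem_of_mem hmem
        have hjn : j < n := lt_of_lt_of_le hj (by simp [List.length_take])
        have hjl : j < cs.length := lt_of_lt_of_le hj (by simp [List.length_take])
        rw [List.getElem_take] at hget
        refine hmin j hjn ⟨cs.drop (j + 1), ?_⟩
        rw [show ("/".toList : List Char) = ['/'] from rfl, List.singleton_append,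
            List.drop_eq_getElem_cons hjl]
        simp [hget]
      have hnint : PySem.Chars.find cs "/".toList = (n : Int) :=
        (Int.toNat_of_nonneg hfind0).symm
      have hAex : scanFileA fileMoves cs = none :=
        scanFileA_none_of_slash fileMoves cs
          (fun p hp => keys_no_slash p (List.mem_append_left _ hp)) hsl
      have hBex : exactB.get? cs = none := by
        rw [exactB_eq, get?_mk_eq_scan]
        exact scanFileA_none_of_slash _ cs keys_no_slash hsl
      have hdir := scanDirA_split dirMoves (cs.take n) (cs.drop (n + 1))
        (fun p hp => keys_no_slash p (List.mem_append_right _ hp)) hnos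
      rw [← hdecomp] at hdir
      rw [hAex, hBex, hdir, hnint, prefixB_eq, get?_mk_eq_scan,
          PySem.List.slice_to_natCast, PySem.List.slice_from_natCast, hdropn]
      cases scanFileA dirMoves (cs.take n) <;> simp
    · -- no slash: the dir loop degenerates to an exact scan, find returns -1
      have hfind : PySem.Chars.find cs "/".toList = -1 := by
        rw [PySem.Chars.find_eq_neg_one_iff]
        rintro ⟨s, t, h⟩
        exact hsl (by rw [← h]; simp)
      rw [exactB_eq, get?_mk_eq_scan, scanFileA_append,
          scanDirA_no_slash dirMoves cs hsl, hfind]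
      cases scanFileA fileMoves cs <;> cases scanFileA dirMoves cs <;> simp
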